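-- pv_equiv track=rewrite | github.com/sewelltatwit/jobs | JuniorDeveloper/main.py | encode_railroad
-- ===== SOURCE A (Python) =====
-- def encode_railroad(secret_phrase):
--     toggle      = True
--     upper_track = []
--     lower_track = []
--
--     for word in secret_phrase.split(" "):
--         if toggle:
--             upper_track.append(word)
--             toggle = False
--             continue
--         lower_track.append(word)
--         toggle = True
--
--     return "{}\r\n{}".format(" ".join(upper_track), " ".join(lower_track))
-- ===== SOURCE B (Python) =====
-- def encode_railroad(secret_phrase):
--     words = secret_phrase.split(" ")
--     return "{}\r\n{}".format(" ".join(words[0::2]), " ".join(words[1::2]))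
-- ===== Notes on version B (the rewrite author's own statement) =====
-- stated objective: simpler
-- what changed: Replaces the boolean-toggle loop with two appends by a single split followed by parity stride slices words[0::2] and words[1::2]; no loop or mutable state.
import Mathlib
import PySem

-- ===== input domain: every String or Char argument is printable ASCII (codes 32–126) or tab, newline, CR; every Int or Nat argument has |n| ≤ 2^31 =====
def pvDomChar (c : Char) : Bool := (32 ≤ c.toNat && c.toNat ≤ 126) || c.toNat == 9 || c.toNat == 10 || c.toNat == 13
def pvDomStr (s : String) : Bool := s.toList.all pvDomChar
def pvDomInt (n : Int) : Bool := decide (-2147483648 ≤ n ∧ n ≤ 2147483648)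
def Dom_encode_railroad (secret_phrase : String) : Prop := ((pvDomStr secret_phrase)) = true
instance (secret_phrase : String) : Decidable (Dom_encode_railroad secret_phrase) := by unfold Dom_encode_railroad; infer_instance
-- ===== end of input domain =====

-- B replaces A's boolean-toggle loop (two accumulators, mutable toggle) by one split
-- followed by parity stride slices words[0::2] / words[1::2]; objective: simpler.

-- ===== PORT A =====
-- loop body of A: state (toggle, upper_track, lower_track), one word at a time
def railStep (st : Bool × List String × List String) (word : String) :
    Bool × List String × List String :=
  if st.1 then (false, st.2.1 ++ [word], st.2.2)
  else (true, st.2.1, st.2.2 ++ [word])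

def encode_railroad (secret_phrase : String) : String :=
  let fin := ((PySem.Str.split? secret_phrase " ").getD []).foldl railStep (true, [], [])
  PySem.Str.join " " fin.2.1 ++ "\r\n" ++ PySem.Str.join " " fin.2.2

-- ===== PORT B =====
-- hand port of Python step-2 stride slicing: stride2 xs = xs[0::2] (so xs[1::2] = stride2 (xs.drop 1));
-- exact for lists: takes every second element starting at the head.
def stride2 : List String → List String
  | [] => []
  | [x] => [x]
  | x :: _ :: rest => x :: stride2 rest

def encode_railroad_alt (secret_phrase : String) : String :=
  let words := (PySem.Str.split? secret_phrase " ").getD []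
  PySem.Str.join " " (stride2 words) ++ "\r\n" ++ PySem.Str.join " " (stride2 (words.drop 1))

-- ===== PRECONDITION & SPEC =====
def Spec_encode_railroad (secret_phrase : String) (out : String) : Prop := out = encode_railroad_alt secret_phrase
instance (secret_phrase : String) (out : String) : Decidable (Spec_encode_railroad secret_phrase out) := by unfold Spec_encode_railroad; infer_instance

-- ===== CLAIM (what is proved, stated in full; the proofs are below) =====
def Claim_equal_encode_railroad : Prop := ∀ (secret_phrase : String), Dom_encode_railroad secret_phrase → Spec_encode_railroad secret_phrase (encode_railroad secret_phrase)

-- ===== LEMMAS AND PROOFS =====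
theorem stride2_cons (x : String) (rest : List String) :
    stride2 (x :: rest) = x :: stride2 (rest.drop 1) := by
  cases rest <;> simp [stride2]

theorem railStep_loop (ws : List String) : ∀ (u l : List String),
    (ws.foldl railStep (true, u, l)).2 = (u ++ stride2 ws, l ++ stride2 (ws.drop 1))
    ∧ (ws.foldl railStep (false, u, l)).2 = (u ++ stride2 (ws.drop 1), l ++ stride2 ws) := by
  induction ws with
  | nil => intro u l; simp [stride2]
  | cons x rest ih =>
    intro u l
    refine ⟨?_, ?_⟩ <;>
    · simp only [List.foldl_cons, railStep]
      simp only [if_true, if_false, Bool.false_eq_true]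
      first
        | rw [(ih (u ++ [x]) l).2]
        | rw [(ih u (l ++ [x])).1]
      simp [stride2_cons]

-- ===== VERDICT (by name: the statement is the Claim_ definition above) =====
theorem encode_railroad_spec : Claim_equal_encode_railroad := by
  intro s _
  unfold Spec_encode_railroad encode_railroad encode_railroad_alt
  have h := (railStep_loop ((PySem.Str.split? s " ").getD []) [] []).1
  simp only [List.nil_append] at h
  simp only []
  rw [show (List.foldl railStep (true, ([] : List String), ([] : List String))
        ((PySem.Str.split? s " ").getD [])).2.1 = _ from congrArg Prod.fst h,
      show (List.foldl railStep (true, ([] : List String), ([] : List String))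
        ((PySem.Str.split? s " ").getD [])).2.2 = _ from congrArg Prod.snd h]
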